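-- pv_equiv track=rewrite | github.com/stevste/Projet-S4 | Solver3D.py | GetEdgePermCoord
-- ===== SOURCE A (Python) =====
-- import math
--
-- def ComparePiece(p1, p2):
--     for i in p2:
--         if i not in p1:
--             return False
--     return True
--
-- def GetEdgePermCoord(pieceList, ref):
--     coord = 0
--     perm = []
--
--     for i in pieceList:
--         j=0
--         while not ComparePiece(i, ref[j]) and j <=7 :
--             j += 1
--         if j<=7:
--             perm.append(j)
--
--     for i in range(1, len(perm)):
--         k = 0
--         for j in range(0, i):
--             if perm[j] >= perm[i]:
--                 k += 1
--         coord += k*math.factorial(i)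
--
--     return coord
-- ===== SOURCE B (Python) =====
-- import math
--
-- def ComparePiece(p1, p2):
--     for i in p2:
--         if i not in p1:
--             return False
--     return True
--
-- def GetEdgePermCoord(pieceList, ref):
--     # phase 1: first matching slot among ref[:8] per piece
--     perm = []
--     for piece in pieceList:
--         for j, r in enumerate(ref[:8]):
--             if ComparePiece(piece, r):
--                 perm.append(j)
--                 break
--     # phase 2: Lehmer coordinate in one forward pass with a frequency table
--     coord = 0
--     fact = 1
--     freq = [0] * 8
--     for i, p in enumerate(perm):
--         if i > 0:
--             fact *= i
--             coord += sum(freq[p:]) * fact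
--         freq[p] += 1
--     return coord
-- ===== Notes on version B (the rewrite author's own statement) =====
-- stated objective: alternative
-- what changed: The nested inversion count is replaced by a single forward pass maintaining a size-8 frequency table and a running factorial, and the slot search becomes a break-on-first-match scan over ref[:8]; Pre_ excludes only inputs where A raises IndexError (a piece matching nothing in ref with len(ref) < 9).
import Mathlib
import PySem

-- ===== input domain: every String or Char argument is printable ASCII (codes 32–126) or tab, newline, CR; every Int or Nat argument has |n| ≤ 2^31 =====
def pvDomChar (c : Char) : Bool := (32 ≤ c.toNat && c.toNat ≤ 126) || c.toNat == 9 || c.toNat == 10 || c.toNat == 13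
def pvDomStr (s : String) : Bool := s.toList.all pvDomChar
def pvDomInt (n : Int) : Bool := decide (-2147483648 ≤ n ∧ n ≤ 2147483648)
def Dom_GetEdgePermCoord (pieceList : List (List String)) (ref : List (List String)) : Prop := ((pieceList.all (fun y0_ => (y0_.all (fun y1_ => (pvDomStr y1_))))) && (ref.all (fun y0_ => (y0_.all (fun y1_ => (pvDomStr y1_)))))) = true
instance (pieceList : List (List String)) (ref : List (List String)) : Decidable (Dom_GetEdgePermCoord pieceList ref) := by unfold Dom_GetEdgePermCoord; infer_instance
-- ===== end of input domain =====

-- B replaces A's nested inversion count by one forward pass over a size-8 frequency table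
-- (with a running factorial) and finds each piece's slot by a first-match scan of ref[:8];
-- objective: alternative (a different algorithm of similar measured cost).


-- ===== PORT A =====
-- helper shared by both Pythons: for i in p2: if i not in p1: return False / return True
def ComparePiece (p1 p2 : List String) : Bool := p2.all (fun i => p1.contains i)

-- A's while loop:  while not ComparePiece(i, ref[j]) and j <= 7: j += 1
-- ref[j] is PySem.List.pyGet?; `none` is where Python raises IndexError (excluded by Pre_),
-- the port exits the loop there.
def aLoop (piece : List String) (ref : List (List String)) (j : Nat) : Nat :=
  if h : (match PySem.List.pyGet? ref (j : Int) with
          | some r => !ComparePiece piece r && decide (j ≤ 7)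
          | none => false) = true then
    aLoop piece ref (j + 1)
  else j
termination_by 8 - j
decreasing_by
  rcases hg : PySem.List.pyGet? ref (j : Int) with _ | r
  · simp [hg] at h
  · simp [hg] at h; omega

def GetEdgePermCoord (pieceList : List (List String)) (ref : List (List String)) : Int :=
  let perm : List Nat := pieceList.foldl (fun acc piece =>
      let j := aLoop piece ref 0
      if j ≤ 7 then acc ++ [j] else acc) []
  -- for i in range(1, len(perm)): k = #{j < i | perm[j] >= perm[i]} (inner foldl); coord += k * i!
  (List.range' 1 (perm.length - 1)).foldl (fun coord i =>
      coord + ((List.range i).foldl (fun k j =>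
          if perm.getD i 0 ≤ perm.getD j 0 then k + 1 else k) (0 : Int)) * (Nat.factorial i : Int)) 0

-- ===== PORT B =====
-- Source B: for j, r in enumerate(ref[:8]): if ComparePiece(piece, r): append j; break
def bScan (piece : List String) (rs : List (List String)) (j : Nat) : Option Nat :=
  match rs with
  | [] => none
  | r :: rest => if ComparePiece piece r then some j else bScan piece rest (j + 1)

-- Source B's loop body: if i > 0: fact *= i; coord += sum(freq[p:]) * fact;  freq[p] += 1
def bStep (st : Int × Int × List Int) (i p : Nat) : Int × Int × List Int :=
  let (coord, fact, freq) := st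
  if 0 < i then
    let fact := fact * (i : Int)
    let coord := coord + (freq.drop p).sum * fact
    (coord, fact, freq.set p (freq.getD p 0 + 1))
  else
    (coord, fact, freq.set p (freq.getD p 0 + 1))

-- for i, p in enumerate(perm): …
def bFold (i : Nat) (st : Int × Int × List Int) : List Nat → Int × Int × List Int
  | [] => st
  | p :: rest => bFold (i + 1) (bStep st i p) rest

def GetEdgePermCoord_alt (pieceList : List (List String)) (ref : List (List String)) : Int :=
  let perm : List Nat := pieceList.foldl (fun acc piece =>
      match bScan piece (ref.take 8) 0 with
      | some j => acc ++ [j]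
      | none => acc) []
  (bFold 0 (0, 1, List.replicate 8 0) perm).1

-- ===== PRECONDITION & SPEC =====
-- Pre_ excludes exactly the inputs on which the Python A raises IndexError: some piece matches
-- no ref entry among the indices A probes and ref is too short (< 9) for the probe ref[j] to stay
-- in range.  A returns normally on every input satisfying Pre_.
def Pre_GetEdgePermCoord (pieceList : List (List String)) (ref : List (List String)) : Prop :=
  ∀ piece ∈ pieceList,
    (∃ j < min ref.length 9, ComparePiece piece (ref.getD j []) = true) ∨ 9 ≤ ref.length
instance (pieceList : List (List String)) (ref : List (List String)) : Decidable (Pre_GetEdgePermCoord pieceList ref) := by unfold Pre_GetEdgePermCoord; infer_instance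
def pvWitness_GetEdgePermCoord : List (List String) × List (List String) := ([[ "a" ]], [[ "a" ]])

def Spec_GetEdgePermCoord (pieceList : List (List String)) (ref : List (List String)) (out : Int) : Prop := out = GetEdgePermCoord_alt pieceList ref
instance (pieceList : List (List String)) (ref : List (List String)) (out : Int) : Decidable (Spec_GetEdgePermCoord pieceList ref out) := by unfold Spec_GetEdgePermCoord; infer_instance

-- ===== CLAIM (what is proved, stated in full; the proofs are below) =====
def Claim_equal_GetEdgePermCoord : Prop := ∀ (pieceList : List (List String)) (ref : List (List String)), Dom_GetEdgePermCoord pieceList ref → Pre_GetEdgePermCoord pieceList ref → Spec_GetEdgePermCoord pieceList ref (GetEdgePermCoord pieceList ref)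

-- ===== LEMMAS AND PROOFS =====

-- phase 1 --------------------------------------------------------------

theorem bScan_some_lt {piece : List String} {rs : List (List String)} :
    ∀ {j m : Nat}, bScan piece rs j = some m → m < j + rs.length := by
  induction rs with
  | nil => intro j m h; simp [bScan] at h
  | cons r rest ih =>
      intro j m h
      simp only [bScan] at h
      split at h
      · simp only [Option.some.injEq] at h
        simp [← h]
      · have := ih h
        simp only [List.length_cons]
        omega

-- all probed indices in range ⇒ A's scan agrees with B's scan on the remaining window
theorem aLoop_stop (piece : List String) (ref : List (List String)) :
    aLoop piece ref 8 = 8 := by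
  rw [aLoop]
  have hm : (match PySem.List.pyGet? ref ((8 : Nat) : Int) with
      | some r => !ComparePiece piece r && decide (8 ≤ 7)
      | none => false) = false := by
    rcases PySem.List.pyGet? ref ((8 : Nat) : Int) with _ | r <;> simp
  simp only [hm]
  simp

theorem scan_eq_inrange (piece : List String) (ref : List (List String)) :
    ∀ n j, j + n = 8 → (∀ l, j ≤ l → l ≤ 7 → l < ref.length) →
      aLoop piece ref j = ((bScan piece ((ref.drop j).take n) j).getD 8) := by
  intro n
  induction n with
  | zero =>
      intro j hj _
      have hj8 : j = 8 := by omega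
      subst hj8
      simp [aLoop_stop, bScan]
  | succ n ih =>
      intro j hj hin
      have hjlt : j < ref.length := hin j le_rfl (by omega)
      have hget : PySem.List.pyGet? ref (j : Int) = some ref[j] := by
        rw [PySem.List.pyGet?_natCast]; exact List.getElem?_eq_getElem hjlt
      have htake : (ref.drop j).take (n + 1) = ref[j] :: (ref.drop (j + 1)).take n := by
        rw [List.drop_eq_getElem_cons hjlt, List.take_succ_cons]
      rw [aLoop, htake]
      by_cases hc : ComparePiece piece ref[j] = true
      · rw [bScan, if_pos hc]
        have hcond : ¬ ((match PySem.List.pyGet? ref (j : Int) with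
            | some r => !ComparePiece piece r && decide (j ≤ 7)
            | none => false) = true) := by
          rw [hget]; simp [hc]
        rw [dif_neg hcond]
        rfl
      · rw [bScan, if_neg hc]
        have hcond : (match PySem.List.pyGet? ref (j : Int) with
            | some r => !ComparePiece piece r && decide (j ≤ 7)
            | none => false) = true := by
          rw [hget]; simp [hc]; omega
        rw [dif_pos hcond]
        exact ih (j + 1) (by omega) (fun l hl hl7 => hin l (by omega) hl7)

-- a match exists at m (j ≤ m ≤ 8, in range) ⇒ same conclusion without the range hypothesis
theorem scan_eq_match (piece : List String) (ref : List (List String)) :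
    ∀ n j m, j + n = 8 → j ≤ m → m ≤ 8 → (hm : m < ref.length) →
      ComparePiece piece ref[m] = true →
      aLoop piece ref j = ((bScan piece ((ref.drop j).take n) j).getD 8) := by
  intro n
  induction n with
  | zero =>
      intro j m hj hjm hm8 hm hmatch
      have hj8 : j = 8 := by omega
      subst hj8
      simp [aLoop_stop, bScan]
  | succ n ih =>
      intro j m hj hjm hm8 hm hmatch
      have hjlt : j < ref.length := by omega
      have hget : PySem.List.pyGet? ref (j : Int) = some ref[j] := by
        rw [PySem.List.pyGet?_natCast]; exact List.getElem?_eq_getElem hjlt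
      have htake : (ref.drop j).take (n + 1) = ref[j] :: (ref.drop (j + 1)).take n := by
        rw [List.drop_eq_getElem_cons hjlt, List.take_succ_cons]
      rw [aLoop, htake]
      by_cases hc : ComparePiece piece ref[j] = true
      · rw [bScan, if_pos hc]
        have hcond : ¬ ((match PySem.List.pyGet? ref (j : Int) with
            | some r => !ComparePiece piece r && decide (j ≤ 7)
            | none => false) = true) := by
          rw [hget]; simp [hc]
        rw [dif_neg hcond]
        rfl
      · rw [bScan, if_neg hc]
        have hcond : (match PySem.List.pyGet? ref (j : Int) with
            | some r => !ComparePiece piece r && decide (j ≤ 7)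
            | none => false) = true := by
          rw [hget]; simp [hc]; omega
        rw [dif_pos hcond]
        have hne : j ≠ m := by rintro rfl; exact hc hmatch
        exact ih (j + 1) m (by omega) (by omega) hm8 hm hmatch

theorem piece_eq (piece : List String) (ref : List (List String))
    (h : (∃ j < min ref.length 9, ComparePiece piece (ref.getD j []) = true) ∨ 9 ≤ ref.length) :
    aLoop piece ref 0 = ((bScan piece (ref.take 8) 0).getD 8) := by
  have h0 : ref.drop 0 = ref := by simp
  rcases h with ⟨m, hm, hmatch⟩ | hlen
  · have hmlt : m < ref.length := by omega
    have hm8 : m ≤ 8 := by omega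
    have : ref.getD m [] = ref[m] := List.getD_eq_getElem ref [] hmlt
    rw [this] at hmatch
    have := scan_eq_match piece ref 8 0 m (by omega) (by omega) hm8 hmlt hmatch
    rwa [h0] at this
  · have := scan_eq_inrange piece ref 8 0 (by omega) (fun l _ hl7 => by omega)
    rwa [h0] at this

theorem perm_eq (pieceList ref : List (List String))
    (h : Pre_GetEdgePermCoord pieceList ref) :
    pieceList.foldl (fun acc piece =>
        let j := aLoop piece ref 0
        if j ≤ 7 then acc ++ [j] else acc) []
      = pieceList.foldl (fun acc piece =>
        match bScan piece (ref.take 8) 0 with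
        | some j => acc ++ [j]
        | none => acc) [] := by
  apply PySem.List.foldl_congr_mem
  intro acc piece hmem
  have he := piece_eq piece ref (h piece hmem)
  rcases hs : bScan piece (ref.take 8) 0 with _ | m
  · rw [hs] at he; simp at he
    simp [he]
  · rw [hs] at he; simp at he
    have hlt : m < 8 := by
      have := bScan_some_lt hs
      have hle : (ref.take 8).length ≤ 8 := by simp
      omega
    simp [he, Nat.le_of_lt_succ hlt]

-- phase 2 --------------------------------------------------------------

-- proof-side abbreviations
def histo (l : List Nat) : List Int :=
  l.foldl (fun f p => f.set p (f.getD p 0 + 1)) (List.replicate 8 0)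

def cnt (l : List Nat) (x : Nat) : Nat := l.countP (fun q => decide (x ≤ q))

def coordA (perm : List Nat) : Int :=
  (List.range' 1 (perm.length - 1)).foldl (fun coord i =>
      coord + ((List.range i).foldl (fun k j =>
          if perm.getD i 0 ≤ perm.getD j 0 then k + 1 else k) (0 : Int)) * (Nat.factorial i : Int)) 0

theorem bFold_append (l : List Nat) :
    ∀ i st x, bFold i st (l ++ [x]) = bStep (bFold i st l) (i + l.length) x := by
  induction l with
  | nil => intro i st x; simp [bFold]
  | cons p rest ih => intro i st x; simp [bFold, ih]; ring_nf

-- counting over indices equals counting over elements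
theorem countP_range_getD (l : List Nat) (p : Nat → Bool) :
    (List.range l.length).countP (fun j => p (l.getD j 0)) = l.countP p := by
  induction l with
  | nil => simp
  | cons b t ih =>
      rw [List.length_cons, List.range_succ_eq_map, List.countP_cons, List.countP_map]
      simp only [List.getD_cons_zero, Function.comp_def, List.getD_cons_succ]
      rw [ih, List.countP_cons]

-- incrementing slot p adds 1 to the sum of the dropped tail iff x ≤ p
theorem sum_set_inc (f : List Int) (p x : Nat) (hp : p < f.length) :
    ((f.set p (f.getD p 0 + 1)).drop x).sum
      = (f.drop x).sum + (if x ≤ p then 1 else 0) := by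
  rw [List.drop_set]
  by_cases hxp : x ≤ p
  · rw [if_neg (by omega), if_pos hxp]
    have hq : p - x < (f.drop x).length := by simp; omega
    have hgd : f.getD p 0 = (f.drop x)[p - x] := by
      rw [List.getD_eq_getElem f 0 hp, List.getElem_drop]
      congr 1; omega
    rw [hgd, List.sum_set]
    have hsplit : (f.drop x).sum
        = ((f.drop x).take (p - x)).sum + ((f.drop x)[p - x] + ((f.drop x).drop (p - x + 1)).sum) := by
      conv_lhs => rw [← List.sum_take_add_sum_drop (f.drop x) (p - x)]
      rw [List.drop_eq_getElem_cons hq, List.sum_cons]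
    rw [if_pos hq, hsplit]
    ring
  · rw [if_pos (by omega), if_neg hxp, add_zero]

theorem histo_gen (l : List Nat) :
    ∀ init : List Int, init.length = 8 → (∀ p ∈ l, p < 8) → ∀ x, x < 8 →
      ((l.foldl (fun f p => f.set p (f.getD p 0 + 1)) init).drop x).sum
        = (init.drop x).sum + (cnt l x : Int) := by
  induction l with
  | nil => intro init _ _ x _; simp [cnt]
  | cons p t ih =>
      intro init hlen hb x hx
      rw [List.foldl_cons]
      have hlen' : (init.set p (init.getD p 0 + 1)).length = 8 := by simp [hlen]
      rw [ih _ hlen' (fun q hq => hb q (by simp [hq])) x hx]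
      rw [sum_set_inc init p x (by rw [hlen]; exact hb p (by simp))]
      have : cnt (p :: t) x = cnt t x + (if x ≤ p then 1 else 0) := by
        simp [cnt, List.countP_cons]
      rw [this]
      push_cast
      split_ifs <;> ring

theorem histo_sum (l : List Nat) (hb : ∀ p ∈ l, p < 8) (x : Nat) (hx : x < 8) :
    ((histo l).drop x).sum = (cnt l x : Int) := by
  unfold histo
  rw [histo_gen l (List.replicate 8 0) (by simp) hb x hx]
  rw [List.drop_replicate]
  simp

theorem coordA_snoc (l : List Nat) (x : Nat) :
    coordA (l ++ [x]) = coordA l + (cnt l x : Int) * (Nat.factorial l.length : Int) := by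
  rcases Nat.eq_zero_or_pos l.length with h0 | hpos
  · rw [List.eq_nil_of_length_eq_zero h0]
    simp [coordA, cnt]
  · have hlen : (l ++ [x]).length - 1 = l.length := by simp
    have hrange : List.range' 1 l.length = List.range' 1 (l.length - 1) ++ [l.length] := by
      conv_lhs => rw [show l.length = (l.length - 1) + 1 by omega]
      rw [List.range'_concat]
      congr 2
      omega
    unfold coordA
    rw [hlen, hrange, List.foldl_append, List.foldl_cons, List.foldl_nil]
    have hpref : (List.range' 1 (l.length - 1)).foldl (fun coord i =>
          coord + ((List.range i).foldl (fun k j =>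
            if (l ++ [x]).getD i 0 ≤ (l ++ [x]).getD j 0 then k + 1 else k) 0) * (Nat.factorial i : Int)) 0
        = (List.range' 1 (l.length - 1)).foldl (fun coord i =>
          coord + ((List.range i).foldl (fun k j =>
            if l.getD i 0 ≤ l.getD j 0 then k + 1 else k) 0) * (Nat.factorial i : Int)) 0 := by
      apply PySem.List.foldl_congr_mem
      intro acc i hi
      rw [List.mem_range'] at hi
      congr 1
      congr 1
      apply PySem.List.foldl_congr_mem
      intro k j hj
      rw [List.mem_range] at hj
      rw [List.getD_append l [x] 0 i (by omega), List.getD_append l [x] 0 j (by omega)]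
    rw [hpref]
    have hxn : (l ++ [x]).getD l.length 0 = x := by simp
    have hstep : (List.range l.length).foldl (fun k j =>
          if (l ++ [x]).getD l.length 0 ≤ (l ++ [x]).getD j 0 then k + 1 else k) (0 : Int)
        = (List.range l.length).foldl (fun k j =>
          if decide (x ≤ l.getD j 0) = true then k + 1 else k) (0 : Int) := by
      apply PySem.List.foldl_congr_mem
      intro k j hj
      rw [List.mem_range] at hj
      simp only [hxn, List.getD_append l [x] 0 j hj]
      simp
    have hE : (List.range l.length).foldl (fun k j =>
          if (l ++ [x]).getD l.length 0 ≤ (l ++ [x]).getD j 0 then k + 1 else k) (0 : Int) = (cnt l x : Int) := by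
      refine hstep.trans ?_
      rw [PySem.List.foldl_count_if]
      rw [countP_range_getD l (fun q => decide (x ≤ q))]
      simp [cnt]
    rw [hE]

theorem bFold_inv (perm : List Nat) (hb : ∀ p ∈ perm, p < 8) :
    bFold 0 (0, 1, List.replicate 8 0) perm
      = (coordA perm, (Nat.factorial (perm.length - 1) : Int), histo perm) := by
  induction perm using List.reverseRecOn with
  | nil => simp [bFold, coordA, histo]
  | append_singleton l x ih =>
      have hbl : ∀ p ∈ l, p < 8 := fun p hp => hb p (by simp [hp])
      have hbx : x < 8 := hb x (by simp)
      rw [bFold_append, ih hbl, Nat.zero_add]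
      have hh : histo (l ++ [x]) = (histo l).set x ((histo l).getD x 0 + 1) := by
        unfold histo
        rw [List.foldl_append, List.foldl_cons, List.foldl_nil]
      rcases Nat.eq_zero_or_pos l.length with h0 | hpos
      · rw [List.eq_nil_of_length_eq_zero h0] at *
        simp only [bStep, coordA, histo] at *
        simp
      · have hfact : ((Nat.factorial (l.length - 1) : Int)) * (l.length : Int)
            = (Nat.factorial l.length : Int) := by
          obtain ⟨m, hm⟩ : ∃ m, l.length = m + 1 := ⟨l.length - 1, by omega⟩
          rw [hm]
          simp [Nat.factorial_succ]
          ring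
        have hc : coordA l + ((histo l).drop x).sum * ((Nat.factorial (l.length - 1) : Int)) * (l.length : Int)
            = coordA (l ++ [x]) := by
          rw [coordA_snoc, histo_sum l hbl x hbx, mul_assoc, hfact]
        simp only [bStep, hpos, if_pos, List.length_append, List.length_singleton]
        have hl1 : l.length + 1 - 1 = l.length := by omega
        rw [hl1]
        simp only [Prod.mk.injEq]
        refine ⟨?_, ?_, ?_⟩
        · rw [← hc]; ring
        · rw [hfact]
        · rw [hh]

theorem phase2 (perm : List Nat) (hb : ∀ p ∈ perm, p < 8) :
    coordA perm = (bFold 0 (0, 1, List.replicate 8 0) perm).1 := by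
  rw [bFold_inv perm hb]

-- ===== VERDICT (by name: the statement is the Claim_ definition above) =====
-- every entry of B's perm list is < 8
theorem foldB_mem (ref : List (List String)) :
    ∀ (pieceList : List (List String)) (acc : List Nat) (p : Nat),
      p ∈ pieceList.foldl (fun acc piece =>
        match bScan piece (ref.take 8) 0 with
        | some j => acc ++ [j]
        | none => acc) acc → p ∈ acc ∨ p < 8 := by
  intro pieceList
  induction pieceList with
  | nil => intro acc p hp; exact Or.inl hp
  | cons piece rest ih =>
      intro acc p hp
      rw [List.foldl_cons] at hp
      rcases hs : bScan piece (ref.take 8) 0 with _ | m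
      · rw [hs] at hp
        exact ih _ p hp
      · rw [hs] at hp
        rcases ih _ p hp with hacc | h8
        · rcases List.mem_append.mp hacc with h | h
          · exact Or.inl h
          · right
            simp only [List.mem_singleton] at h
            subst h
            have hlt := bScan_some_lt hs
            have : (ref.take 8).length ≤ 8 := by simp
            omega
        · exact Or.inr h8

theorem GetEdgePermCoord_spec : Claim_equal_GetEdgePermCoord := by
  intro pieceList ref _ hpre
  unfold Spec_GetEdgePermCoord
  have hA : GetEdgePermCoord pieceList ref
      = coordA (pieceList.foldl (fun acc piece =>
          let j := aLoop piece ref 0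
          if j ≤ 7 then acc ++ [j] else acc) []) := rfl
  have hB : GetEdgePermCoord_alt pieceList ref
      = (bFold 0 (0, 1, List.replicate 8 0) (pieceList.foldl (fun acc piece =>
          match bScan piece (ref.take 8) 0 with
          | some j => acc ++ [j]
          | none => acc) [])).1 := rfl
  rw [hA, hB, perm_eq pieceList ref hpre]
  exact phase2 _ (fun p hp => (foldB_mem ref pieceList [] p hp).resolve_left (by simp))
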